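-- pv_equiv track=rewrite | github.com/FailedFeather37/projet-maintenant-nsi | lexer.py | parse_chaine
-- ===== SOURCE A (Python) =====
-- def parse_chaine(texte):
--     L = ""
--     in_quotes = False
--     for c in texte:
--         if c == '"':
--             in_quotes = not in_quotes
--         elif in_quotes:
--             L += c
--         elif L:
--             break
--     return(L,len(L))
-- ===== SOURCE B (Python) =====
-- def parse_chaine(texte):
--     L = ""
--     for i, part in enumerate(texte.split('"')):
--         if i % 2 == 1:
--             L += part
--         elif part and L:
--             break
--     return (L, len(L))
-- ===== Notes on version B (the rewrite author's own statement) =====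
-- stated objective: alternative
-- what changed: Replaces the per-character in_quotes toggle loop with a split('"') followed by one pass over the parts: odd-indexed parts (inside quotes) are appended, a non-empty even-indexed part after something was collected breaks.
import Mathlib
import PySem

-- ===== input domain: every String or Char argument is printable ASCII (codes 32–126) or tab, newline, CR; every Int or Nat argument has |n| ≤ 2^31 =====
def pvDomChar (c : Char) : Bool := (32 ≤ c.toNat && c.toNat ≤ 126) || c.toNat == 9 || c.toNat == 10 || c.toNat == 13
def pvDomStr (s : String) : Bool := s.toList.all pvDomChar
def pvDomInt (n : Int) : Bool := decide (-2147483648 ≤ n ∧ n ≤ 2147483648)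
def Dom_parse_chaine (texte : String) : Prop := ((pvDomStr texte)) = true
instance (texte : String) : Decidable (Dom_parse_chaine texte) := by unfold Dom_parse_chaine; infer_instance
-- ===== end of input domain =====

-- B replaces A's per-character in_quotes toggle loop by split('"') plus one pass over the
-- parts (odd index = inside quotes); return values proved equal on every string.

-- ===== PORT A =====
-- A's for-loop over the characters, state (L, in_quotes); the 'elif L: break' branch returns L.
def pvLoopA : List Char → List Char → Bool → List Char
  | [], L, _ => L
  | c :: cs, L, q =>
      if c = '"' then pvLoopA cs L (!q)
      else if q then pvLoopA cs (L ++ [c]) q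
      else if L ≠ [] then L
      else pvLoopA cs L q

def parse_chaine (texte : String) : String × Int :=
  let L := pvLoopA texte.toList [] false
  (String.ofList L, (L.length : Int))

-- ===== PORT B =====
-- hand port of str.split('"') (single-character separator; exact: ''.split('"') = ['']).
def pvSplitQ : List Char → List (List Char)
  | [] => [[]]
  | c :: cs =>
      if c = '"' then [] :: pvSplitQ cs
      else
        match pvSplitQ cs with
        | p :: ps => (c :: p) :: ps
        | [] => [[c]]

-- B's for-loop over enumerate(parts): odd index appends, non-empty even part with L non-empty breaks.
def pvLoopB : Nat → List (List Char) → List Char → List Char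
  | _, [], L => L
  | i, p :: ps, L =>
      if i % 2 = 1 then pvLoopB (i + 1) ps (L ++ p)
      else if p ≠ [] ∧ L ≠ [] then L
      else pvLoopB (i + 1) ps L

def parse_chaine_alt (texte : String) : String × Int :=
  let L := pvLoopB 0 (pvSplitQ texte.toList) []
  (String.ofList L, (L.length : Int))

-- ===== PRECONDITION & SPEC =====
def Spec_parse_chaine (texte : String) (out : String × Int) : Prop := out = parse_chaine_alt texte
instance (texte : String) (out : String × Int) : Decidable (Spec_parse_chaine texte out) := by unfold Spec_parse_chaine; infer_instance

-- ===== CLAIM (what is proved, stated in full; the proofs are below) =====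
def Claim_equal_parse_chaine : Prop := ∀ (texte : String), Dom_parse_chaine texte → Spec_parse_chaine texte (parse_chaine texte)

-- ===== LEMMAS AND PROOFS =====
theorem pvSplitQ_ne_nil (cs : List Char) : pvSplitQ cs ≠ [] := by
  cases cs with
  | nil => simp [pvSplitQ]
  | cons c cs =>
      simp only [pvSplitQ]
      split
      · simp
      · split <;> simp_all

-- pvLoopB only depends on the parity of the index
theorem pvLoopB_parity (ps : List (List Char)) : ∀ (i j : Nat), i % 2 = j % 2 →
    ∀ L, pvLoopB i ps L = pvLoopB j ps L := by
  induction ps with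
  | nil => intro i j _ L; rfl
  | cons p ps ih =>
      intro i j h L
      simp only [pvLoopB, h]
      split
      · exact ih (i + 1) (j + 1) (by omega) _
      · split
        · rfl
        · exact ih (i + 1) (j + 1) (by omega) _

-- the bridge: A's character loop equals B's pass over the split, index parity = in_quotes
theorem pvLoop_bridge (cs : List Char) : ∀ (L : List Char) (q : Bool),
    pvLoopA cs L q = pvLoopB (if q then 1 else 0) (pvSplitQ cs) L := by
  induction cs with
  | nil =>
      intro L q
      cases q <;> simp [pvLoopA, pvLoopB, pvSplitQ]
  | cons c cs ih =>
      intro L q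
      by_cases hc : c = '"'
      · subst hc
        have hsc : pvSplitQ ('"' :: cs) = [] :: pvSplitQ cs := by simp [pvSplitQ]
        cases q with
        | true =>
            calc pvLoopA ('"' :: cs) L true
                = pvLoopA cs L false := by simp [pvLoopA]
              _ = pvLoopB 0 (pvSplitQ cs) L := by rw [ih L false]; rfl
              _ = pvLoopB 2 (pvSplitQ cs) L := pvLoopB_parity _ 0 2 (by omega) L
              _ = pvLoopB 1 ([] :: pvSplitQ cs) L := by simp [pvLoopB]
              _ = pvLoopB (if true = true then 1 else 0) (pvSplitQ ('"' :: cs)) L := by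
                    rw [hsc]; rfl
        | false =>
            calc pvLoopA ('"' :: cs) L false
                = pvLoopA cs L true := by simp [pvLoopA]
              _ = pvLoopB 1 (pvSplitQ cs) L := by rw [ih L true]; rfl
              _ = pvLoopB 0 ([] :: pvSplitQ cs) L := by simp [pvLoopB]
              _ = pvLoopB (if false = true then 1 else 0) (pvSplitQ ('"' :: cs)) L := by
                    rw [hsc]; rfl
      · obtain ⟨p, ps, hsplit⟩ : ∃ p ps, pvSplitQ cs = p :: ps := by
          cases h : pvSplitQ cs with
          | nil => exact absurd h (pvSplitQ_ne_nil cs)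
          | cons p ps => exact ⟨p, ps, rfl⟩
        have hsc : pvSplitQ (c :: cs) = (c :: p) :: ps := by
          simp [pvSplitQ, hc, hsplit]
        cases q with
        | true =>
            calc pvLoopA (c :: cs) L true
                = pvLoopA cs (L ++ [c]) true := by simp [pvLoopA, hc]
              _ = pvLoopB 1 (p :: ps) (L ++ [c]) := by rw [ih (L ++ [c]) true, hsplit]; rfl
              _ = pvLoopB 2 ps (L ++ [c] ++ p) := by simp [pvLoopB]
              _ = pvLoopB 1 ((c :: p) :: ps) L := by simp [pvLoopB]
              _ = pvLoopB (if true = true then 1 else 0) (pvSplitQ (c :: cs)) L := by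
                    rw [hsc]; rfl
        | false =>
            by_cases hL : L = []
            · subst hL
              calc pvLoopA (c :: cs) [] false
                  = pvLoopA cs [] false := by simp [pvLoopA, hc]
                _ = pvLoopB 0 (p :: ps) [] := by rw [ih [] false, hsplit]; rfl
                _ = pvLoopB 1 ps [] := by simp [pvLoopB]
                _ = pvLoopB 0 ((c :: p) :: ps) [] := by simp [pvLoopB]
                _ = pvLoopB (if false = true then 1 else 0) (pvSplitQ (c :: cs)) [] := by
                      rw [hsc]; rfl
            · calc pvLoopA (c :: cs) L false
                  = L := by simp [pvLoopA, hc, hL]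
                _ = pvLoopB 0 ((c :: p) :: ps) L := by simp [pvLoopB, hL]
                _ = pvLoopB (if false = true then 1 else 0) (pvSplitQ (c :: cs)) L := by
                      rw [hsc]; rfl

-- ===== VERDICT (by name: the statement is the Claim_ definition above) =====
theorem parse_chaine_spec : Claim_equal_parse_chaine := by
  intro texte _
  unfold Spec_parse_chaine parse_chaine parse_chaine_alt
  rw [pvLoop_bridge texte.toList [] false]; rfl
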